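-- pv_equiv track=rewrite | github.com/JPRanx/floor-tile-backend | parsers/tiba_parser.py | _get_column_mapping
-- ===== SOURCE A (Python) =====
-- def _get_column_mapping(columns: list[str]) -> dict:
--     """Map expected columns to actual column names."""
--     mapping = {
--         "departure": None,
--         "arrival": None,
--         "transit": None,
--         "vessel": None,
--         "shipping_line": None,
--         "route": None,
--     }
--
--     for col in columns:
--         col_lower = col.lower()
--         if "salida" in col_lower or "etd" in col_lower:
--             mapping["departure"] = col
--         elif "llegada" in col_lower or "eta" in col_lower:
--             mapping["arrival"] = col
--         elif "transito" in col_lower or "dias" in col_lower: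
--             mapping["transit"] = col
--         elif "buque" in col_lower or "vessel" in col_lower:
--             mapping["vessel"] = col
--         elif "naviera" in col_lower or "shipping" in col_lower or "line" in col_lower:
--             mapping["shipping_line"] = col
--         elif "ruta" in col_lower or "route" in col_lower:
--             mapping["route"] = col
--
--     return mapping
-- ===== SOURCE B (Python) =====
-- RULES = [
--     ("departure", ("salida", "etd")),
--     ("arrival", ("llegada", "eta")),
--     ("transit", ("transito", "dias")),
--     ("vessel", ("buque", "vessel")),
--     ("shipping_line", ("naviera", "shipping", "line")),
--     ("route", ("ruta", "route")),
-- ]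
--
--
-- def _classify(col):
--     cl = col.lower()
--     for key, subs in RULES:
--         if any(s in cl for s in subs):
--             return key
--     return None
--
--
-- def _get_column_mapping(columns):
--     classified = [(_classify(c), c) for c in reversed(columns)]
--     return {key: next((c for k, c in classified if k == key), None)
--             for key, _ in RULES}
-- ===== Notes on version B (the rewrite author's own statement) =====
-- stated objective: idiomatic
-- what changed: Replaces the mutating single pass with an if/elif chain over a dict by a declarative rules table: a classifier maps a column to its first matching rule key, and the mapping is built per key as the first classified match in the reversed column list.
import Mathlib
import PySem

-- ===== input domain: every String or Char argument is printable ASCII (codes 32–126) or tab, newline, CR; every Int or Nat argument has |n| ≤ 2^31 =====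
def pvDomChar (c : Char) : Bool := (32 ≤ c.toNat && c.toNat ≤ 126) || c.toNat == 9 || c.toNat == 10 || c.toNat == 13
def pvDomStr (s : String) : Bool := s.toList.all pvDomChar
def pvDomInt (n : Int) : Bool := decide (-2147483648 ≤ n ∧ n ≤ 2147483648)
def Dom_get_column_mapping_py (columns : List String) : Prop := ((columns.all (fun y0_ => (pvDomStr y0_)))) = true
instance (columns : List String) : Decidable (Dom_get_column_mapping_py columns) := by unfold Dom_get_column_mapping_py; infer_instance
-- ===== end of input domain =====

-- B replaces the mutating if/elif single pass by a rules table with a first-match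
-- classifier and a per-key search over the reversed column list (idiomatic, same cost).

-- ===== PORT A =====
def pvInitA : PySem.Dict String (Option String) :=
  PySem.Dict.ofList [("departure", (none : Option String)), ("arrival", none),
    ("transit", none), ("vessel", none), ("shipping_line", none), ("route", none)]

def pvStepA (mapping : PySem.Dict String (Option String)) (col : String) :
    PySem.Dict String (Option String) :=
  let cl := PySem.Str.lower col
  if PySem.Str.isIn "salida" cl || PySem.Str.isIn "etd" cl then
    mapping.insert "departure" (some col)
  else if PySem.Str.isIn "llegada" cl || PySem.Str.isIn "eta" cl then
    mapping.insert "arrival" (some col)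
  else if PySem.Str.isIn "transito" cl || PySem.Str.isIn "dias" cl then
    mapping.insert "transit" (some col)
  else if PySem.Str.isIn "buque" cl || PySem.Str.isIn "vessel" cl then
    mapping.insert "vessel" (some col)
  else if PySem.Str.isIn "naviera" cl || PySem.Str.isIn "shipping" cl || PySem.Str.isIn "line" cl then
    mapping.insert "shipping_line" (some col)
  else if PySem.Str.isIn "ruta" cl || PySem.Str.isIn "route" cl then
    mapping.insert "route" (some col)
  else mapping

def get_column_mapping_py (columns : List String) : List (String × Option String) :=
  (columns.foldl pvStepA pvInitA).items

-- ===== PORT B =====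
def pvRules : List (String × List String) :=
  [("departure", ["salida", "etd"]), ("arrival", ["llegada", "eta"]),
   ("transit", ["transito", "dias"]), ("vessel", ["buque", "vessel"]),
   ("shipping_line", ["naviera", "shipping", "line"]), ("route", ["ruta", "route"])]

def pvClassify (col : String) : Option String :=
  let cl := PySem.Str.lower col
  (pvRules.find? (fun r => r.2.any (fun s => PySem.Str.isIn s cl))).map Prod.fst

def get_column_mapping_py_alt (columns : List String) : List (String × Option String) :=
  let classified := columns.reverse.map (fun c => (pvClassify c, c))
  pvRules.map (fun r =>
    (r.1, (classified.find? (fun p => p.1 == some r.1)).map Prod.snd))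

-- ===== PRECONDITION & SPEC =====
def Spec_get_column_mapping_py (columns : List String) (out : List (String × Option String)) : Prop := out = get_column_mapping_py_alt columns
instance (columns : List String) (out : List (String × Option String)) : Decidable (Spec_get_column_mapping_py columns out) := by unfold Spec_get_column_mapping_py; infer_instance

-- ===== CLAIM (what is proved, stated in full; the proofs are below) =====
def Claim_equal_get_column_mapping_py : Prop := ∀ (columns : List String), Dom_get_column_mapping_py columns → Spec_get_column_mapping_py columns (get_column_mapping_py columns)

-- ===== LEMMAS AND PROOFS =====

lemma pv_fold_invariant (xs : List String) :
    xs.foldl pvStepA pvInitA =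
      PySem.Dict.mk (pvRules.map (fun r =>
        (r.1, xs.reverse.find? (fun c => pvClassify c == some r.1)))) := by
  induction xs using List.reverseRecOn with
  | nil => rfl
  | append_singleton ys c ih =>
    rw [List.foldl_append, List.foldl_cons, List.foldl_nil, ih]
    show pvStepA _ c = _
    unfold pvStepA
    simp only [List.reverse_append, List.reverse_cons, List.reverse_nil,
      List.nil_append, List.cons_append]
    split_ifs with h1 h2 h3 h4 h5 h6
    · have hc : pvClassify c = some "departure" := by
        simp only [pvClassify, pvRules, List.find?, List.any_cons, List.any_nil,
          Bool.or_false, h1]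
        rfl
      apply PySem.Dict.ext
      simp [pvRules, hc, List.find?, PySem.Dict.items_insert, PySem.Dict.contains_mk]
    · have hc : pvClassify c = some "arrival" := by
        simp only [Bool.not_eq_true, Bool.or_eq_false_iff] at h1
        simp only [pvClassify, pvRules, List.find?, List.any_cons, List.any_nil,
          Bool.or_false, h1.1, h1.2, h2]
        rfl
      apply PySem.Dict.ext
      simp [pvRules, hc, List.find?, PySem.Dict.items_insert, PySem.Dict.contains_mk]
    · have hc : pvClassify c = some "transit" := by
        simp only [Bool.not_eq_true, Bool.or_eq_false_iff] at h1 h2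
        simp only [pvClassify, pvRules, List.find?, List.any_cons, List.any_nil,
          Bool.or_false, h1.1, h1.2, h2.1, h2.2, h3]
        rfl
      apply PySem.Dict.ext
      simp [pvRules, hc, List.find?, PySem.Dict.items_insert, PySem.Dict.contains_mk]
    · have hc : pvClassify c = some "vessel" := by
        simp only [Bool.not_eq_true, Bool.or_eq_false_iff] at h1 h2 h3
        simp only [pvClassify, pvRules, List.find?, List.any_cons, List.any_nil,
          Bool.or_false, h1.1, h1.2, h2.1, h2.2, h3.1, h3.2, h4]
        rfl
      apply PySem.Dict.ext
      simp [pvRules, hc, List.find?, PySem.Dict.items_insert, PySem.Dict.contains_mk]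
    · have hc : pvClassify c = some "shipping_line" := by
        simp only [Bool.not_eq_true, Bool.or_eq_false_iff] at h1 h2 h3 h4
        rw [Bool.or_assoc] at h5
        simp only [pvClassify, pvRules, List.find?, List.any_cons, List.any_nil,
          Bool.or_false, h1.1, h1.2, h2.1, h2.2, h3.1, h3.2, h4.1, h4.2, h5]
        rfl
      apply PySem.Dict.ext
      simp [pvRules, hc, List.find?, PySem.Dict.items_insert, PySem.Dict.contains_mk]
    · have hc : pvClassify c = some "route" := by
        simp only [Bool.not_eq_true, Bool.or_eq_false_iff] at h1 h2 h3 h4 h5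
        simp only [pvClassify, pvRules, List.find?, List.any_cons, List.any_nil,
          Bool.or_false, h1.1, h1.2, h2.1, h2.2, h3.1, h3.2, h4.1, h4.2, h5.1.1, h5.1.2, h5.2, h6]
        rfl
      apply PySem.Dict.ext
      simp [pvRules, hc, List.find?, PySem.Dict.items_insert, PySem.Dict.contains_mk]
    · have hc : pvClassify c = none := by
        simp only [Bool.not_eq_true, Bool.or_eq_false_iff] at h1 h2 h3 h4 h5 h6
        simp only [pvClassify, pvRules, List.find?, List.any_cons, List.any_nil,
          Bool.or_false, h1.1, h1.2, h2.1, h2.2, h3.1, h3.2, h4.1, h4.2, h5.1.1, h5.1.2, h5.2, h6.1, h6.2]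
        rfl
      apply PySem.Dict.ext
      simp [pvRules, hc, List.find?]

lemma pv_find?_classify (l : List String) (k : String) :
    Option.map Prod.snd
        ((l.map (fun c => (pvClassify c, c))).find? (fun p => p.1 == some k)) =
      l.find? (fun c => pvClassify c == some k) := by
  induction l with
  | nil => rfl
  | cons c t ih =>
    simp only [List.map_cons, List.find?]
    cases hb : pvClassify c == some k
    · exact ih
    · rfl

-- ===== VERDICT (by name: the statement is the Claim_ definition above) =====
theorem get_column_mapping_py_spec : Claim_equal_get_column_mapping_py := by
  intro columns _
  unfold Spec_get_column_mapping_py get_column_mapping_py get_column_mapping_py_alt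
  rw [pv_fold_invariant]
  simp only [pv_find?_classify]
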